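-- pv_equiv track=rewrite | github.com/krishnap25/casimir | casimir/data/named_entity_recognition/reader.py | _find_num_sentences
-- ===== SOURCE A (Python) =====
-- def _find_num_sentences(lines):
--     i = 0  # num sentences
--     j = 0  # num doc_start
--     doc_start = False
--     for line in lines:
--         if line[0:10] == u'-DOCSTART-':
--             j += 1
--             doc_start = True
--             continue
--         elif doc_start:
--             doc_start = False
--             continue
--         elif line.isspace() or (len(line) > 10 and line[0:10] == u'-DOCSTART-'):
--             i += 1
--     return i
-- ===== SOURCE B (Python) =====
-- def _find_num_sentences(lines):
--     return sum(1 for idx, line in enumerate(lines)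
--                if line.isspace() and (idx == 0 or lines[idx - 1][0:10] != u'-DOCSTART-'))
-- ===== Notes on version B (the rewrite author's own statement) =====
-- stated objective: simpler
-- what changed: Replaced the stateful loop carrying a doc_start flag (and an unused DOCSTART counter) with a stateless one-line generator sum that counts a whitespace line unless its predecessor line starts with '-DOCSTART-'; the generator sum avoids per-line flag bookkeeping.
import Mathlib
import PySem

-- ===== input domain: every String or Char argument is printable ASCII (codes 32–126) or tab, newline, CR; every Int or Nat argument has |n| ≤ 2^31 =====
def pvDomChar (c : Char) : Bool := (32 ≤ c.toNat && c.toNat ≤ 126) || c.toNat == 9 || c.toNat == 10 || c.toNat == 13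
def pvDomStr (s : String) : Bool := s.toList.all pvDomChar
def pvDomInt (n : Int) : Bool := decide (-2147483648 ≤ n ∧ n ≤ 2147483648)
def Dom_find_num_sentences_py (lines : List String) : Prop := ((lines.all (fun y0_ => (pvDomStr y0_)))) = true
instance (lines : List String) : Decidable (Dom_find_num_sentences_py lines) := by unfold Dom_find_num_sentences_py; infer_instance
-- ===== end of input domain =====

-- B replaces A's stateful doc_start-flag loop by a stateless predecessor-test sum (objective: simpler).

-- ===== PORT A =====
def find_num_sentences_py (lines : List String) : Int :=
  (lines.foldl
    (fun (s : Int × Int × Bool) line =>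
      if PySem.Str.slice line (some 0) (some 10) == "-DOCSTART-" then
        (s.1, s.2.1 + 1, true)
      else if s.2.2 then
        (s.1, s.2.1, false)
      else if PySem.Str.strIsspace line
              || (decide (PySem.Str.len line > 10)
                  && (PySem.Str.slice line (some 0) (some 10) == "-DOCSTART-")) then
        (s.1 + 1, s.2.1, s.2.2)
      else
        s)
    ((0 : Int), (0 : Int), false)).1

-- ===== PORT B =====
def find_num_sentences_py_alt (lines : List String) : Int :=
  (lines.zipIdx.map
    (fun (p : String × Nat) =>
      if PySem.Str.strIsspace p.1
          && (p.2 == 0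
              || !((PySem.List.pyGet? lines ((p.2 : Int) - 1)).map
                     (fun q => PySem.Str.slice q (some 0) (some 10)) == some "-DOCSTART-")) then
        (1 : Int)
      else 0)).sum

-- ===== PRECONDITION & SPEC =====
def Spec_find_num_sentences_py (lines : List String) (out : Int) : Prop := out = find_num_sentences_py_alt lines
instance (lines : List String) (out : Int) : Decidable (Spec_find_num_sentences_py lines out) := by unfold Spec_find_num_sentences_py; infer_instance

-- ===== CLAIM (what is proved, stated in full; the proofs are below) =====
def Claim_equal_find_num_sentences_py : Prop := ∀ (lines : List String), Dom_find_num_sentences_py lines → Spec_find_num_sentences_py lines (find_num_sentences_py lines)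

-- ===== LEMMAS AND PROOFS =====

/-- Is the (optional) previous line a DOCSTART line? -/
def pvIsDoc : Option String → Bool
  | none => false
  | some p => PySem.Str.slice p (some 0) (some 10) == "-DOCSTART-"

/-- Common reference recursion: count whitespace lines whose predecessor is not DOCSTART. -/
def pvGo : Option String → List String → Int
  | _, [] => 0
  | prev, l :: rest =>
      (if PySem.Str.strIsspace l && !(pvIsDoc prev) then (1 : Int) else 0) + pvGo (some l) rest

/-- A line whose first-10-characters slice is "-DOCSTART-" is not whitespace. -/
lemma pv_doc_not_space (l : String) :
    PySem.Str.slice l (some 0) (some 10) == "-DOCSTART-" → PySem.Str.strIsspace l = false := by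
  intro h
  have h' : (PySem.Str.slice l (some 0) (some 10)).toList = "-DOCSTART-".toList := by
    rw [(beq_iff_eq).mp h]
  rw [PySem.Str.toList_slice] at h'
  simp only [PySem.Chars.slice_eq_listSlice, PySem.List.slice_zero_start] at h'
  have h10 := PySem.List.slice_to_natCast (xs := l.toList) (b := 10)
  norm_num at h10
  rw [h10] at h'
  have hmem : '-' ∈ l.toList := by
    have : '-' ∈ l.toList.take 10 := by rw [h']; decide
    exact List.mem_of_mem_take this
  simp only [PySem.Str.strIsspace, PySem.Chars.strIsspace]
  by_contra hsp
  simp only [Bool.not_eq_false, Bool.and_eq_true, List.all_eq_true] at hsp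
  exact absurd (hsp.2 '-' hmem) (by decide)

/-- A's fold, started with any counters and a flag matching `pvIsDoc prev`, counts `pvGo prev`. -/
lemma pvA_eq_go (rest : List String) : ∀ (i j : Int) (prev : Option String),
    ((rest.foldl
      (fun (s : Int × Int × Bool) line =>
        if PySem.Str.slice line (some 0) (some 10) == "-DOCSTART-" then
          (s.1, s.2.1 + 1, true)
        else if s.2.2 then
          (s.1, s.2.1, false)
        else if PySem.Str.strIsspace line
                || (decide (PySem.Str.len line > 10)
                    && (PySem.Str.slice line (some 0) (some 10) == "-DOCSTART-")) then
          (s.1 + 1, s.2.1, s.2.2)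
        else
          s)
      (i, j, pvIsDoc prev)).1 : Int) = i + pvGo prev rest := by
  induction rest with
  | nil => intro i j prev; simp [pvGo]
  | cons l rest ih =>
    intro i j prev
    by_cases hd : (PySem.Str.slice l (some 0) (some 10) == "-DOCSTART-") = true
    · have hsp := pv_doc_not_space l hd
      have hflag : pvIsDoc (some l) = true := hd
      simp only [List.foldl_cons, hd, if_true]
      rw [show ((i, j + 1, true) : Int × Int × Bool) = (i, j + 1, pvIsDoc (some l)) by rw [hflag]]
      rw [ih i (j + 1) (some l)]
      simp only [PySem.Str.strIsspace] at hsp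
      simp [pvGo, hsp]
    · have hflag : pvIsDoc (some l) = false := by
        simp only [pvIsDoc]; exact Bool.not_eq_true _ ▸ (by simpa using hd)
      by_cases hp : pvIsDoc prev = true
      · simp only [List.foldl_cons, Bool.not_eq_true] at hd
        simp only [List.foldl_cons, hd, Bool.false_eq_true, if_false, hp, if_true]
        rw [show ((i, j, false) : Int × Int × Bool) = (i, j, pvIsDoc (some l)) by rw [hflag]]
        rw [ih i j (some l)]
        simp [pvGo, hp]
      · have hp' : pvIsDoc prev = false := by simpa using hp
        simp only [Bool.not_eq_true] at hd
        simp only [List.foldl_cons, hd, Bool.false_eq_true, if_false, hp']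
        by_cases hs : PySem.Str.strIsspace l = true
        · simp only [hs, Bool.true_or, if_true]
          rw [show ((i + 1, j, false) : Int × Int × Bool) = (i + 1, j, pvIsDoc (some l)) by rw [hflag]]
          rw [ih (i + 1) j (some l)]
          simp only [PySem.Str.strIsspace] at hs
          simp [pvGo, hs, hp']
          ring
        · have hs' : PySem.Str.strIsspace l = false := by simpa using hs
          simp only [hs', Bool.false_or, Bool.and_false, Bool.false_eq_true, if_false]
          rw [show ((i, j, false) : Int × Int × Bool) = (i, j, pvIsDoc (some l)) by rw [hflag]]
          rw [ih i j (some l)]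
          simp only [PySem.Str.strIsspace] at hs'
          simp [pvGo, hs']

/-- The predecessor of position `k` in `lines`. -/
def pvPrev (lines : List String) (k : Nat) : Option String :=
  if k = 0 then none else lines[k - 1]?

/-- B's indexed sum over a suffix counts `pvGo` of that suffix. -/
lemma pvB_eq_go (lines : List String) : ∀ (rest : List String) (k : Nat),
    rest = lines.drop k →
    ((rest.zipIdx k).map
      (fun (p : String × Nat) =>
        if PySem.Str.strIsspace p.1
            && (p.2 == 0
                || !((PySem.List.pyGet? lines ((p.2 : Int) - 1)).map
                       (fun q => PySem.Str.slice q (some 0) (some 10)) == some "-DOCSTART-")) then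
          (1 : Int)
        else 0)).sum = pvGo (pvPrev lines k) rest := by
  intro rest
  induction rest with
  | nil => intro k _; simp [pvGo]
  | cons l rest ih =>
    intro k hk
    have hlen : k < lines.length := by
      by_contra h
      rw [List.drop_eq_nil_of_le (by omega)] at hk
      exact List.cons_ne_nil _ _ hk
    have hget : lines[k]? = some l := by
      have := congrArg (fun t => t.head?) hk
      simpa [List.head?_drop] using this.symm
    have hrest : rest = lines.drop (k + 1) := by
      have := congrArg (fun t => t.tail) hk
      simpa [List.tail_drop] using this
    simp only [List.zipIdx_cons, List.map_cons, List.sum_cons]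
    rw [ih (k + 1) hrest]
    have hprev1 : pvPrev lines (k + 1) = some l := by
      simp [pvPrev, hget]
    rw [hprev1]
    congr 1
    -- the head's contribution equals pvGo's head term
    by_cases h0 : k = 0
    · subst h0
      simp [pvPrev, pvIsDoc]
    · obtain ⟨k', rfl⟩ : ∃ k', k = k' + 1 := ⟨k - 1, by omega⟩
      have hk' : k' < lines.length := by omega
      have hgd : PySem.List.pyGet? lines (((k' + 1 : Nat) : Int) - 1) = lines[k']? := by
        have : (((k' + 1 : Nat) : Int) - 1) = ((k' : Nat) : Int) := by push_cast; ring
        rw [this, PySem.List.pyGet?_natCast]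
      have hq' : lines[k']? = some (lines[k']) := List.getElem?_eq_getElem hk'
      rw [hgd, hq']
      simp only [pvPrev, Nat.add_sub_cancel, if_neg (Nat.succ_ne_zero k'), hq', pvIsDoc]
      have : ((k' + 1 : Nat) == 0) = false := by simp
      simp only [this, Bool.false_or, Option.map_some]
      by_cases hd : (PySem.Str.slice (lines[k']) (some 0) (some 10) == "-DOCSTART-") = true
      · rw [(beq_iff_eq).mp hd]
        simp [hd]
      · have hne : PySem.Str.slice (lines[k']) (some 0) (some 10) ≠ "-DOCSTART-" := by
          simpa using hd
        have : ((some (PySem.Str.slice (lines[k']) (some 0) (some 10)) : Option String)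
                  == some "-DOCSTART-") = false := by
          simpa using hne
        simp [this, hd]

-- ===== VERDICT (by name: the statement is the Claim_ definition above) =====
theorem find_num_sentences_py_spec : Claim_equal_find_num_sentences_py := by
  intro lines _
  unfold Spec_find_num_sentences_py find_num_sentences_py find_num_sentences_py_alt
  have hA := pvA_eq_go lines 0 0 none
  simp only [pvIsDoc] at hA
  rw [hA]
  have hB := pvB_eq_go lines lines 0 (by simp)
  rw [hB]
  simp [pvPrev]
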